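-- pv_equiv track=rewrite | github.com/PraxedisHaze/CodeGnosis-1.0 | codegnosis.py | _detect_frameworks
-- ===== SOURCE A (Python) =====
-- def _detect_frameworks(file_types):
--     """Detect frameworks used in the project."""
--     frameworks = set()
--
--     files = list(file_types.keys())
--     types = list(file_types.values())
--
--     # Check for web frameworks
--     if "React" in types or "TypeScript React" in types:
--         frameworks.add("React")
--
--     if any("vue" in f.lower() for f in files):
--         frameworks.add("Vue")
--
--     if any("angular" in f.lower() for f in files):
--         frameworks.add("Angular")
--
--     # Check for backend frameworks
--     if any("django" in f.lower() or "manage.py" in f for f in files):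
--         frameworks.add("Django")
--
--     if any("flask" in f.lower() or "app.py" in f for f in files):
--         frameworks.add("Flask")
--
--     if any("express" in f.lower() or "server.js" in f for f in files):
--         frameworks.add("Express")
--
--     # Check for build tools
--     if "package.json" in files:
--         frameworks.add("npm/Node.js")
--
--     if "requirements.txt" in files or "setup.py" in files:
--         frameworks.add("Python")
--
--     return sorted(list(frameworks))
-- ===== SOURCE B (Python) =====
-- # Single pass accumulating eight boolean flags, then emitting the result list
-- # directly in lexicographic order -- no set and no sort.
-- def _detect_frameworks(file_types):
--     """Detect frameworks used in the project (flag accumulator, no set/sort)."""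
--     react = vue = angular = django = flask = express = npm = pyproj = False
--     for fname, ftype in file_types.items():
--         low = fname.lower()
--         react = react or ftype in ("React", "TypeScript React")
--         vue = vue or "vue" in low
--         angular = angular or "angular" in low
--         django = django or "django" in low or "manage.py" in fname
--         flask = flask or "flask" in low or "app.py" in fname
--         express = express or "express" in low or "server.js" in fname
--         npm = npm or fname == "package.json"
--         pyproj = pyproj or fname in ("requirements.txt", "setup.py")
--     out = []
--     if angular:
--         out.append("Angular")
--     if django:
--         out.append("Django")
--     if express:
--         out.append("Express")
--     if flask:
--         out.append("Flask")
--     if pyproj: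
--         out.append("Python")
--     if react:
--         out.append("React")
--     if vue:
--         out.append("Vue")
--     if npm:
--         out.append("npm/Node.js")
--     return out
-- ===== Notes on version B (the rewrite author's own statement) =====
-- stated objective: alternative
-- what changed: Replaces A's set-plus-sort with a single pass over the dict items that accumulates eight boolean flags (one per framework) and then emits the result list directly in lexicographic order, eliminating both the set and the sorted() call.
import Mathlib
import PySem

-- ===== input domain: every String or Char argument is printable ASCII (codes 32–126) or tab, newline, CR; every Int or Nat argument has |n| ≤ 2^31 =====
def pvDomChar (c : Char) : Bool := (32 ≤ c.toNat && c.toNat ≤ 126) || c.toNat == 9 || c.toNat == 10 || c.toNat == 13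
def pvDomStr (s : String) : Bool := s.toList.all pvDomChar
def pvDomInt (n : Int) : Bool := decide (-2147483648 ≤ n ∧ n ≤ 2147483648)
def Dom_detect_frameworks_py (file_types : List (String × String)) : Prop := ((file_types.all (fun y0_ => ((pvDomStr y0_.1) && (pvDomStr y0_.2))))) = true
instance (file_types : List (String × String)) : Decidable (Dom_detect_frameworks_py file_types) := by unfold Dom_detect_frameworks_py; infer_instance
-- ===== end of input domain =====

-- B accumulates eight boolean flags in one pass over the dict items and emits the result
-- list directly in lexicographic order, eliminating A's set and sorted() call (objective: alternative).

-- ===== PORT A =====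

def detect_frameworks_py (file_types : List (String × String)) : List String :=
  let d := PySem.Dict.ofList file_types
  let frameworks : PySem.Set String := PySem.Set.empty
  let files := PySem.Dict.keys d
  let types := PySem.Dict.values d
  let frameworks := if types.contains "React" || types.contains "TypeScript React" then PySem.Set.add frameworks "React" else frameworks
  let frameworks := if files.any (fun f => PySem.Str.isIn "vue" (PySem.Str.lower f)) then PySem.Set.add frameworks "Vue" else frameworks
  let frameworks := if files.any (fun f => PySem.Str.isIn "angular" (PySem.Str.lower f)) then PySem.Set.add frameworks "Angular" else frameworks
  let frameworks := if files.any (fun f => PySem.Str.isIn "django" (PySem.Str.lower f) || PySem.Str.isIn "manage.py" f) then PySem.Set.add frameworks "Django" else frameworks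
  let frameworks := if files.any (fun f => PySem.Str.isIn "flask" (PySem.Str.lower f) || PySem.Str.isIn "app.py" f) then PySem.Set.add frameworks "Flask" else frameworks
  let frameworks := if files.any (fun f => PySem.Str.isIn "express" (PySem.Str.lower f) || PySem.Str.isIn "server.js" f) then PySem.Set.add frameworks "Express" else frameworks
  let frameworks := if files.contains "package.json" then PySem.Set.add frameworks "npm/Node.js" else frameworks
  let frameworks := if files.contains "requirements.txt" || files.contains "setup.py" then PySem.Set.add frameworks "Python" else frameworks
  PySem.List.sorted frameworks (fun x => x) false

-- ===== PORT B =====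
-- the eight flags: (react, vue, angular, django, flask, express, npm, pyproj)
abbrev PvFlags := Bool × Bool × Bool × Bool × Bool × Bool × Bool × Bool

def pvStep (acc : PvFlags) (it : String × String) : PvFlags :=
  let low := PySem.Str.lower it.1
  (acc.1 || (it.2 == "React" || it.2 == "TypeScript React"),
   acc.2.1 || PySem.Str.isIn "vue" low,
   acc.2.2.1 || PySem.Str.isIn "angular" low,
   acc.2.2.2.1 || (PySem.Str.isIn "django" low || PySem.Str.isIn "manage.py" it.1),
   acc.2.2.2.2.1 || (PySem.Str.isIn "flask" low || PySem.Str.isIn "app.py" it.1),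
   acc.2.2.2.2.2.1 || (PySem.Str.isIn "express" low || PySem.Str.isIn "server.js" it.1),
   acc.2.2.2.2.2.2.1 || it.1 == "package.json",
   acc.2.2.2.2.2.2.2 || (it.1 == "requirements.txt" || it.1 == "setup.py"))

def pvEmit (react vue angular django flask express npm pyproj : Bool) : List String :=
  (if angular then ["Angular"] else []) ++
  (if django then ["Django"] else []) ++
  (if express then ["Express"] else []) ++
  (if flask then ["Flask"] else []) ++
  (if pyproj then ["Python"] else []) ++
  (if react then ["React"] else []) ++
  (if vue then ["Vue"] else []) ++
  (if npm then ["npm/Node.js"] else [])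

def detect_frameworks_py_alt (file_types : List (String × String)) : List String :=
  let d := PySem.Dict.ofList file_types
  let fl := (PySem.Dict.items d).foldl pvStep
      (false, false, false, false, false, false, false, false)
  pvEmit fl.1 fl.2.1 fl.2.2.1 fl.2.2.2.1 fl.2.2.2.2.1 fl.2.2.2.2.2.1 fl.2.2.2.2.2.2.1 fl.2.2.2.2.2.2.2

-- ===== PRECONDITION & SPEC =====
def Spec_detect_frameworks_py (file_types : List (String × String)) (out : List String) : Prop := out = detect_frameworks_py_alt file_types
instance (file_types : List (String × String)) (out : List String) : Decidable (Spec_detect_frameworks_py file_types out) := by unfold Spec_detect_frameworks_py; infer_instance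

-- ===== CLAIM (what is proved, stated in full; the proofs are below) =====
def Claim_equal_detect_frameworks_py : Prop := ∀ (file_types : List (String × String)), Dom_detect_frameworks_py file_types → Spec_detect_frameworks_py file_types (detect_frameworks_py file_types)

-- ===== LEMMAS AND PROOFS =====

-- A's set-building chain, abstracted over the eight branch conditions (same add order as A)
def pvASet (react vue angular django flask express npm pyproj : Bool) : PySem.Set String :=
  let s : PySem.Set String := PySem.Set.empty
  let s := if react then PySem.Set.add s "React" else s
  let s := if vue then PySem.Set.add s "Vue" else s
  let s := if angular then PySem.Set.add s "Angular" else s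
  let s := if django then PySem.Set.add s "Django" else s
  let s := if flask then PySem.Set.add s "Flask" else s
  let s := if express then PySem.Set.add s "Express" else s
  let s := if npm then PySem.Set.add s "npm/Node.js" else s
  let s := if pyproj then PySem.Set.add s "Python" else s
  s

theorem pvEmit_sublist (r v an dj fl ex n p : Bool) :
    (pvEmit r v an dj fl ex n p).Sublist
      ["Angular", "Django", "Express", "Flask", "Python", "React", "Vue", "npm/Node.js"] := by
  unfold pvEmit
  show List.Sublist _ (["Angular"] ++ ["Django"] ++ ["Express"] ++ ["Flask"] ++ ["Python"] ++ ["React"] ++ ["Vue"] ++ ["npm/Node.js"])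
  repeat' apply List.Sublist.append
  all_goals (split <;> simp)

theorem pvFull_pairwise :
    (["Angular", "Django", "Express", "Flask", "Python", "React", "Vue", "npm/Node.js"] : List String).Pairwise (fun a b => a < b) := by
  have h : (["Angular", "Django", "Express", "Flask", "Python", "React", "Vue", "npm/Node.js"] : List String).Pairwise
      (fun a b => a.toList < b.toList) := by decide
  exact h.imp (fun {a b} hab => String.lt_iff_toList_lt.mpr hab)

set_option maxHeartbeats 4000000 in
theorem sorted_pvASet (r v an dj fl ex n p : Bool) :
    PySem.List.sorted (pvASet r v an dj fl ex n p) (fun x => x) false = pvEmit r v an dj fl ex n p := by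
  apply PySem.List.sorted_id_eq_of_perm_of_pairwise
  · cases r <;> cases v <;> cases an <;> cases dj <;> cases fl <;> cases ex <;> cases n <;> cases p <;> decide
  · exact (pvFull_pairwise.sublist (pvEmit_sublist r v an dj fl ex n p)).imp le_of_lt

theorem foldl_pvStep (items : List (String × String)) (acc : PvFlags) :
    items.foldl pvStep acc =
      (acc.1 || items.any (fun it => it.2 == "React" || it.2 == "TypeScript React"),
       acc.2.1 || items.any (fun it => PySem.Str.isIn "vue" (PySem.Str.lower it.1)),
       acc.2.2.1 || items.any (fun it => PySem.Str.isIn "angular" (PySem.Str.lower it.1)),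
       acc.2.2.2.1 || items.any (fun it => PySem.Str.isIn "django" (PySem.Str.lower it.1) || PySem.Str.isIn "manage.py" it.1),
       acc.2.2.2.2.1 || items.any (fun it => PySem.Str.isIn "flask" (PySem.Str.lower it.1) || PySem.Str.isIn "app.py" it.1),
       acc.2.2.2.2.2.1 || items.any (fun it => PySem.Str.isIn "express" (PySem.Str.lower it.1) || PySem.Str.isIn "server.js" it.1),
       acc.2.2.2.2.2.2.1 || items.any (fun it => it.1 == "package.json"),
       acc.2.2.2.2.2.2.2 || items.any (fun it => it.1 == "requirements.txt" || it.1 == "setup.py")) := by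
  induction items generalizing acc with
  | nil => simp
  | cons it its ih =>
    rw [List.foldl_cons, ih]
    simp [pvStep, Bool.or_assoc]

theorem pv_cond_contains (l : List (String × String)) (f : String × String → String) (a : String) :
    (l.map f).contains a = l.any (fun it => f it == a) := by
  rw [Bool.eq_iff_iff]
  simp only [List.contains_eq_mem, decide_eq_true_eq, List.mem_map, List.any_eq_true,
    beq_iff_eq]

theorem pv_any_or (l : List (String × String)) (p q : String × String → Bool) :
    l.any (fun it => p it || q it) = (l.any p || l.any q) := by
  induction l with
  | nil => rfl
  | cons x xs ih =>
    simp only [List.any_cons, ih]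
    cases p x <;> cases q x <;> cases xs.any p <;> cases xs.any q <;> rfl

set_option maxHeartbeats 1000000 in
theorem pv_main_eq (file_types : List (String × String)) :
    detect_frameworks_py file_types = detect_frameworks_py_alt file_types := by
  simp only [detect_frameworks_py, detect_frameworks_py_alt, foldl_pvStep, Bool.false_or]
  rw [show ∀ r v an dj fl ex n p : Bool, pvEmit r v an dj fl ex n p =
      PySem.List.sorted (pvASet r v an dj fl ex n p) (fun x => x) false from
      fun r v an dj fl ex n p => (sorted_pvASet r v an dj fl ex n p).symm]
  simp only [PySem.Dict.keys, PySem.Dict.values, List.any_map, Function.comp_def,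
    pv_cond_contains, pv_any_or, pvASet, PySem.Set.empty]

-- ===== VERDICT (by name: the statement is the Claim_ definition above) =====
theorem detect_frameworks_py_spec : Claim_equal_detect_frameworks_py := by
  intro file_types _
  unfold Spec_detect_frameworks_py
  exact pv_main_eq file_types
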